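-- pv_equiv track=rewrite | github.com/CaioLucas355/Exerc-cios-de-Python-BSI-IFES | ExDicionarios.py | q5_b
-- ===== SOURCE A (Python) =====
-- def dataAnterior(data1, data2):
--     d1 ,m1, a1 = data1;
--     d2 , m2, a2 = data2;
--     if a1<a2:
--         return True;
--     elif a1>a2:
--         return False;
--     elif m1<m2:
--         return True;
--     elif m1>m2:
--         return False;
--     elif d1<d2:
--         return True;
--     return False;
--
-- def q5_a(infracoes, data_atual):
--     recentes = [];
--     dia, mes, ano = data_atual;
--     ano_passado = (dia, mes, ano-1);
--     for infracion in infracoes: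
--         data_infracao = infracion[1];
--         if dataAnterior(ano_passado, data_infracao):
--             recentes.append(infracion);
--     return recentes;
--
-- def q5_b(cnh, data_atual, infracoes, veiculos, naturezas):
--     recentes = q5_a(infracoes ,data_atual);
--     pontos = 0;
--     plc = "";
--     for placa in veiculos:
--         cn_h, _ , _ = veiculos[placa];
--         if cn_h == cnh:
--             plc = placa;
--     for inf in recentes:
--         _ , _ , pla_ca, nivel = inf;
--         if pla_ca == plc:
--             for niv in naturezas:
--                 if niv == nivel:
--                     pontos += naturezas[niv];
--     return pontos;
-- ===== SOURCE B (Python) =====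
-- def q5_b(cnh, data_atual, infracoes, veiculos, naturezas):
--     dia, mes, ano = data_atual
--     plc = ""
--     for placa, (dono, _, _) in veiculos.items():
--         if dono == cnh:
--             plc = placa
--     # histogram: multiplicity of each severity level among the driver's recent infractions
--     contagem = {}
--     for _, (d, m, a), placa, nivel in infracoes:
--         if placa == plc and (ano - 1, mes, dia) < (a, m, d):
--             contagem[nivel] = contagem.get(nivel, 0) + 1
--     # weighted dot product of the nature table with the histogram
--     return sum(pts * contagem.get(nivel, 0) for nivel, pts in naturezas.items())
-- ===== Notes on version B (the rewrite author's own statement) =====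
-- stated objective: alternative
-- what changed: A fixes the driver's plate and then, per recent infraction of that plate, rescans the whole nature table to add its weight; B never looks up a weight per infraction: it builds a histogram counting each severity level among the driver's recent infractions, then computes one weighted dot product by iterating the nature table once (sum of points * multiplicity).
import Mathlib
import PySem

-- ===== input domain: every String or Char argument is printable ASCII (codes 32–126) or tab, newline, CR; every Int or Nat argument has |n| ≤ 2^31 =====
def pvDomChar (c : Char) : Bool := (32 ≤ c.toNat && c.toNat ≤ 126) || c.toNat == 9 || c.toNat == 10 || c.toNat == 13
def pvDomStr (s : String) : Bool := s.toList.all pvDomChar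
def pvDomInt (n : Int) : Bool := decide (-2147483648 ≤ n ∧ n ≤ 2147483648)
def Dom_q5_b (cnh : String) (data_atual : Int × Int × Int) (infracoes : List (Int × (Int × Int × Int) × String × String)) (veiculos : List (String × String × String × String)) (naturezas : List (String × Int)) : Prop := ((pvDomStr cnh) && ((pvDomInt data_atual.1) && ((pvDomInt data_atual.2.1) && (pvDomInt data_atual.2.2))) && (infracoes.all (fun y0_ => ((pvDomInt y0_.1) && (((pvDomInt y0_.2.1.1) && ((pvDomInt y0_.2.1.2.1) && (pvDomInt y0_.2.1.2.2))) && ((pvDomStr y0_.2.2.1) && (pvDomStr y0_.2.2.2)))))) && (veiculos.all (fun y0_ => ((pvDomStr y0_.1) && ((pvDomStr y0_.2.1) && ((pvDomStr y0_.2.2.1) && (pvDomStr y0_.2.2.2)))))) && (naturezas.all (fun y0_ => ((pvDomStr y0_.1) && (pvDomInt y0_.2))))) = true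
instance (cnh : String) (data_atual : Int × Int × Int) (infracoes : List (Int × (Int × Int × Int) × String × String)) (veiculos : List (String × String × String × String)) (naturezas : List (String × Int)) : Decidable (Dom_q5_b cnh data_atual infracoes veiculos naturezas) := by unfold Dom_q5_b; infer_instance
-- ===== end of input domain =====

-- B replaces A's per-infraction rescan of the nature table by a histogram of severity levels
-- among the driver's recent infractions followed by one weighted dot product over naturezas;
-- objective: alternative.


-- ===== PORT A =====
def dataAnterior (data1 data2 : Int × Int × Int) : Bool :=
  let (d1, m1, a1) := data1
  let (d2, m2, a2) := data2
  if a1 < a2 then true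
  else if a1 > a2 then false
  else if m1 < m2 then true
  else if m1 > m2 then false
  else if d1 < d2 then true
  else false

def q5_a (infracoes : List (Int × (Int × Int × Int) × String × String)) (data_atual : Int × Int × Int) : List (Int × (Int × Int × Int) × String × String) :=
  let (dia, mes, ano) := data_atual
  let ano_passado := (dia, mes, ano - 1)
  infracoes.foldl (fun recentes infracion =>
    if dataAnterior ano_passado infracion.2.1 then recentes ++ [infracion] else recentes) []

def q5_b (cnh : String) (data_atual : Int × Int × Int) (infracoes : List (Int × (Int × Int × Int) × String × String)) (veiculos : List (String × String × String × String)) (naturezas : List (String × Int)) : Int :=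
  let recentes := q5_a infracoes data_atual
  let vd : PySem.Dict String (String × String × String) := PySem.Dict.ofList veiculos
  let nd : PySem.Dict String Int := PySem.Dict.ofList naturezas
  -- for placa in veiculos: the lookup veiculos[placa] always succeeds (placa is a key); getD is exact here
  let plc := vd.keys.foldl (fun plc placa =>
    if (vd.getD placa ("", "", "")).1 == cnh then placa else plc) ""
  recentes.foldl (fun pontos inf =>
    if inf.2.2.1 == plc then
      nd.keys.foldl (fun pontos niv =>
        if niv == inf.2.2.2 then pontos + nd.getD niv 0 else pontos) pontos
    else pontos) 0

-- ===== PORT B =====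
-- Python tuple comparison (a1,m1,d1) < (a2,m2,d2), exact for Int triples
def tupleLt (x y : Int × Int × Int) : Bool :=
  decide (x.1 < y.1 ∨ (x.1 = y.1 ∧ (x.2.1 < y.2.1 ∨ (x.2.1 = y.2.1 ∧ x.2.2 < y.2.2))))

def q5_b_alt (cnh : String) (data_atual : Int × Int × Int) (infracoes : List (Int × (Int × Int × Int) × String × String)) (veiculos : List (String × String × String × String)) (naturezas : List (String × Int)) : Int :=
  let (dia, mes, ano) := data_atual
  let vd : PySem.Dict String (String × String × String) := PySem.Dict.ofList veiculos
  let nd : PySem.Dict String Int := PySem.Dict.ofList naturezas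
  let plc := vd.items.foldl (fun plc pv => if pv.2.1 == cnh then pv.1 else plc) ""
  let contagem := infracoes.foldl (fun t inf =>
    if inf.2.2.1 == plc && tupleLt (ano - 1, mes, dia) (inf.2.1.2.2, inf.2.1.2.1, inf.2.1.1) then
      t.modify inf.2.2.2 0 (· + 1)
    else t) PySem.Dict.empty
  (nd.items.map (fun kv => kv.2 * contagem.getD kv.1 0)).sum

-- ===== PRECONDITION & SPEC =====
def Spec_q5_b (cnh : String) (data_atual : Int × Int × Int) (infracoes : List (Int × (Int × Int × Int) × String × String)) (veiculos : List (String × String × String × String)) (naturezas : List (String × Int)) (out : Int) : Prop := out = q5_b_alt cnh data_atual infracoes veiculos naturezas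
instance (cnh : String) (data_atual : Int × Int × Int) (infracoes : List (Int × (Int × Int × Int) × String × String)) (veiculos : List (String × String × String × String)) (naturezas : List (String × Int)) (out : Int) : Decidable (Spec_q5_b cnh data_atual infracoes veiculos naturezas out) := by unfold Spec_q5_b; infer_instance

-- ===== CLAIM (what is proved, stated in full; the proofs are below) =====
def Claim_equal_q5_b : Prop := ∀ (cnh : String) (data_atual : Int × Int × Int) (infracoes : List (Int × (Int × Int × Int) × String × String)) (veiculos : List (String × String × String × String)) (naturezas : List (String × Int)), Dom_q5_b cnh data_atual infracoes veiculos naturezas → Spec_q5_b cnh data_atual infracoes veiculos naturezas (q5_b cnh data_atual infracoes veiculos naturezas)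

-- ===== LEMMAS AND PROOFS =====

-- A's if-chain on (day, month, year) is the strict lexicographic order on (year, month, day)
theorem dataAnterior_eq_tupleLt (x y : Int × Int × Int) :
    dataAnterior x y = tupleLt (x.2.2, x.2.1, x.1) (y.2.2, y.2.1, y.1) := by
  obtain ⟨d1, m1, a1⟩ := x; obtain ⟨d2, m2, a2⟩ := y
  simp only [dataAnterior, tupleLt]
  split_ifs <;> (rw [eq_comm]; simp only [decide_eq_true_eq, decide_eq_false_iff_not]; omega)

-- scanning a duplicate-free list for one key adds its value (or 0) once
theorem foldl_scan_eq_add {κ : Type} [DecidableEq κ] (g : κ → Int) (k : κ) :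
    ∀ (l : List κ) (p0 : Int), l.Nodup →
      l.foldl (fun p x => if x = k then p + g x else p) p0
        = p0 + (if k ∈ l then g k else 0) := by
  intro l
  induction l with
  | nil => intro p0 _; simp
  | cons x l ih =>
    intro p0 hnd
    rcases List.nodup_cons.mp hnd with ⟨hx, hnd'⟩
    simp only [List.foldl_cons]
    by_cases hxk : x = k
    · subst hxk
      rw [if_pos rfl, ih _ hnd', if_neg hx]
      simp [List.mem_cons]
    · rw [if_neg hxk, ih _ hnd']
      have hk2 : k ≠ x := fun h => hxk h.symm
      simp [List.mem_cons, hk2]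

-- a fold that conditionally adds is the initial value plus the sum of the added terms
theorem foldl_add_if {α : Type} (c : α → Bool) (w : α → Int) :
    ∀ (l : List α) (p0 : Int),
      l.foldl (fun p x => if c x then p + w x else p) p0
        = p0 + (l.map (fun x => if c x then w x else 0)).sum := by
  intro l
  induction l with
  | nil => intro p0; simp
  | cons x l ih =>
    intro p0
    simp only [List.foldl_cons, List.map_cons, List.sum_cons]
    by_cases hc : c x
    · simp [hc, ih]; ring
    · simp [hc, ih]

-- picking one element out of a duplicate-free list by a sum
theorem sum_map_pick {l : List String} (hnd : l.Nodup) (g : String → Int) (m : String) :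
    (l.map (fun k => if k = m then g k else 0)).sum = if m ∈ l then g m else 0 := by
  induction l with
  | nil => simp
  | cons x l ih =>
    rcases List.nodup_cons.mp hnd with ⟨hx, hnd'⟩
    simp only [List.map_cons, List.sum_cons]
    by_cases hxm : x = m
    · subst hxm
      rw [if_pos rfl, ih hnd', if_neg hx]
      simp [List.mem_cons]
    · rw [if_neg hxm, ih hnd']
      have hm2 : m ≠ x := fun h => hxm h.symm
      simp [List.mem_cons, hm2]

-- dot product of a dict's items with a multiplicity vector = sum of lookups over the multiset
theorem sum_items_dot_count (nd : PySem.Dict String Int) (hnd : nd.keys.Nodup) :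
    ∀ (ms : List String),
      (nd.items.map (fun kv => kv.2 * ((ms.count kv.1 : Int)))).sum
        = (ms.map (fun m => nd.getD m 0)).sum := by
  intro ms
  induction ms with
  | nil => simp
  | cons m ms ih =>
    simp only [List.map_cons, List.sum_cons]
    have hcnt : ∀ kv : String × Int, ((List.count kv.1 (m :: ms) : Int))
        = (if kv.1 = m then (1 : Int) else 0) + (List.count kv.1 ms : Int) := by
      intro kv
      rw [List.count_cons]
      by_cases h : kv.1 = m
      · simp [h]; omega
      · have : ¬ (m = kv.1) := fun he => h he.symm
        simp [h, this]

    have hsplit : (nd.items.map (fun kv => kv.2 * ((List.count kv.1 (m :: ms) : Int)))).sum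
        = (nd.items.map (fun kv => if kv.1 = m then kv.2 else 0)).sum
          + (nd.items.map (fun kv => kv.2 * ((List.count kv.1 ms : Int)))).sum := by
      rw [← List.sum_map_add]
      apply congrArg List.sum
      apply List.map_congr_left
      intro kv _
      rw [hcnt kv]
      by_cases h : kv.1 = m
      · simp [h]; ring
      · simp [h]
    rw [hsplit, ih]
    congr 1
    -- Σ over items of (value if key = m) = nd.getD m 0
    rw [PySem.Dict.items_eq_map_keys nd hnd 0, List.map_map]
    have : ((fun kv : String × Int => if kv.1 = m then kv.2 else 0) ∘ fun k => (k, nd.getD k 0))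
        = fun k => if k = m then nd.getD k 0 else 0 := by
      funext k; simp
    rw [this, sum_map_pick hnd (fun k => nd.getD k 0) m]
    by_cases hm : m ∈ nd.keys
    · simp [hm]
    · rw [if_neg hm, PySem.Dict.getD_of_not_contains nd 0 (by
        cases hc : nd.contains m
        · rfl
        · exact absurd ((PySem.Dict.contains_iff_mem_keys nd m).mp hc) hm)]

-- summing over a filtered list = summing a conditional weight over the whole list
theorem sum_map_filter {α : Type} (p : α → Bool) (f : α → Int) (l : List α) :
    ((l.filter p).map f).sum = (l.map (fun x => if p x then f x else 0)).sum := by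
  induction l with
  | nil => simp
  | cons x l ih =>
    by_cases h : p x <;> simp [h, ih]

-- ===== VERDICT (by name: the statement is the Claim_ definition above) =====
theorem q5_b_spec : Claim_equal_q5_b := by
  intro cnh data_atual infracoes veiculos naturezas _
  unfold Spec_q5_b q5_b q5_b_alt q5_a
  obtain ⟨dia, mes, ano⟩ := data_atual
  dsimp only
  set vd : PySem.Dict String (String × String × String) := PySem.Dict.ofList veiculos with hvd
  set nd : PySem.Dict String Int := PySem.Dict.ofList naturezas with hnd
  -- both sides pick the same plate: B's fold over items = A's fold over keys with getD
  have hplceq : vd.items.foldl (fun plc pv => if pv.2.1 == cnh then pv.1 else plc) ""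
      = vd.keys.foldl (fun plc placa => if (vd.getD placa ("", "", "")).1 == cnh then placa else plc) "" := by
    rw [PySem.Dict.items_eq_map_keys vd (PySem.Dict.nodup_keys_ofList veiculos) ("", "", ""),
      List.foldl_map]
  rw [hplceq]
  set plc := vd.keys.foldl (fun plc placa => if (vd.getD placa ("", "", "")).1 == cnh then placa else plc) "" with hplc
  -- A's q5_a loop is a filter
  have hrec : infracoes.foldl (fun recentes infracion =>
        if dataAnterior (dia, mes, ano - 1) infracion.2.1 then recentes ++ [infracion] else recentes) []
      = infracoes.filter (fun i => dataAnterior (dia, mes, ano - 1) i.2.1) := by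
    simpa using PySem.List.foldl_append_if
      (fun i : Int × (Int × Int × Int) × String × String => dataAnterior (dia, mes, ano - 1) i.2.1)
      (fun x => x) infracoes []
  rw [hrec, List.foldl_filter]
  -- A's inner scan of naturezas adds nd.getD nivel 0
  have hinner : ∀ (p : Int) (nivel : String),
      nd.keys.foldl (fun pontos niv => if niv == nivel then pontos + nd.getD niv 0 else pontos) p
        = p + nd.getD nivel 0 := by
    intro p nivel
    have h1 : (fun (pontos : Int) (niv : String) => if niv == nivel then pontos + nd.getD niv 0 else pontos)
        = fun pontos niv => if niv = nivel then pontos + nd.getD niv 0 else pontos := by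
      funext pontos niv; simp only [beq_iff_eq]
    rw [h1, foldl_scan_eq_add (fun niv => nd.getD niv 0) nivel nd.keys p (PySem.Dict.nodup_keys_ofList naturezas)]
    by_cases hm : nivel ∈ nd.keys
    · rw [if_pos hm]
    · rw [if_neg hm, PySem.Dict.getD_of_not_contains nd 0 (by
        cases hc : nd.contains nivel
        · rfl
        · exact absurd ((PySem.Dict.contains_iff_mem_keys nd nivel).mp hc) hm)]
  -- A reduces to a conditional-sum fold over infracoes
  have hfun : (fun (pontos : Int) (inf : Int × (Int × Int × Int) × String × String) =>
        if dataAnterior (dia, mes, ano - 1) inf.2.1 then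
          (if inf.2.2.1 == plc then
            nd.keys.foldl (fun pontos niv => if niv == inf.2.2.2 then pontos + nd.getD niv 0 else pontos) pontos
          else pontos)
        else pontos)
      = fun pontos inf =>
          if (inf.2.2.1 == plc && tupleLt (ano - 1, mes, dia) (inf.2.1.2.2, inf.2.1.2.1, inf.2.1.1)) then
            pontos + nd.getD inf.2.2.2 0
          else pontos := by
    funext pontos inf
    rw [hinner]
    have hd : dataAnterior (dia, mes, ano - 1) inf.2.1
        = tupleLt (ano - 1, mes, dia) (inf.2.1.2.2, inf.2.1.2.1, inf.2.1.1) := by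
      simpa using dataAnterior_eq_tupleLt (dia, mes, ano - 1) inf.2.1
    rw [hd]
    by_cases h1 : tupleLt (ano - 1, mes, dia) (inf.2.1.2.2, inf.2.1.2.1, inf.2.1.1)
      <;> by_cases h2 : inf.2.2.1 == plc <;> simp [h1, h2]
  rw [hfun,
    foldl_add_if (fun inf : Int × (Int × Int × Int) × String × String =>
        inf.2.2.1 == plc && tupleLt (ano - 1, mes, dia) (inf.2.1.2.2, inf.2.1.2.1, inf.2.1.1))
      (fun inf => nd.getD inf.2.2.2 0) infracoes 0]
  -- B's histogram fold = counter over the matching levels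
  have hcont : infracoes.foldl (fun t inf =>
        if inf.2.2.1 == plc && tupleLt (ano - 1, mes, dia) (inf.2.1.2.2, inf.2.1.2.1, inf.2.1.1) then
          t.modify inf.2.2.2 0 (· + 1)
        else t) (PySem.Dict.empty : PySem.Dict String Int)
      = ((infracoes.filter (fun inf =>
            inf.2.2.1 == plc && tupleLt (ano - 1, mes, dia) (inf.2.1.2.2, inf.2.1.2.1, inf.2.1.1))).map
          (fun inf => inf.2.2.2)).foldl (fun t x => t.modify x 0 (· + 1)) (PySem.Dict.empty : PySem.Dict String Int) := by
    rw [List.foldl_map, List.foldl_filter]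
  rw [hcont]
  set ms := ((infracoes.filter (fun inf =>
      inf.2.2.1 == plc && tupleLt (ano - 1, mes, dia) (inf.2.1.2.2, inf.2.1.2.1, inf.2.1.1))).map
    (fun inf => inf.2.2.2)) with hms
  have hgetD : ∀ k : String,
      (ms.foldl (fun t x => t.modify x 0 (· + 1)) (PySem.Dict.empty : PySem.Dict String Int)).getD k 0 = (ms.count k : Int) := by
    intro k
    rw [PySem.Dict.getD_foldl_modify_add_one, PySem.Dict.getD_empty]
    ring
  have hBdot : (nd.items.map (fun kv =>
        kv.2 * (ms.foldl (fun t x => t.modify x 0 (· + 1)) (PySem.Dict.empty : PySem.Dict String Int)).getD kv.1 0)).sum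
      = (ms.map (fun m => nd.getD m 0)).sum := by
    rw [show (fun kv : String × Int =>
          kv.2 * (ms.foldl (fun t x => t.modify x 0 (· + 1)) (PySem.Dict.empty : PySem.Dict String Int)).getD kv.1 0)
        = fun kv => kv.2 * ((ms.count kv.1 : Int)) by funext kv; rw [hgetD]]
    exact sum_items_dot_count nd (PySem.Dict.nodup_keys_ofList naturezas) ms
  rw [hBdot, hms, List.map_map]
  simp only [Function.comp_def]
  rw [sum_map_filter]
  simp
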